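-- pv_equiv track=rewrite | github.com/EitanKalman/AnalysisOfVigenereCryptanalysis-6CCS3PRJ | src/helper_functions.py | shift_char
-- ===== SOURCE A (Python) =====
-- def shift_char(char, shift):
--     """
--     Shifts a character based on a given shift
--         Parameters:
--             char (char): The character to be shifted (will be converted to lowercase)
--             shift (int): The number of places to shift
--         Returns:
--             char (char): The character resulting from the shift
--         Raises:
--             TypeError: If shift isn't an integer
--             AssertionError: If char isn't a letter character
--             TypeError: If char isn't a single character
--     """
--     assert char.isalpha()
--     if len(char) != 1:
--         raise TypeError("char must be a single character")
--     char = char.lower()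
--     val = ord(char)
--     val += shift
--     while val > 122:
--         val -= 26
--     while val < 97:
--         val +=26
--     return chr(val)
-- ===== SOURCE B (Python) =====
-- def shift_char(char, shift):
--     """Shift a letter by `shift`, wrapping within a-z (closed-form modulo)."""
--     assert char.isalpha()
--     if len(char) != 1:
--         raise TypeError("char must be a single character")
--     char = char.lower()
--     return chr(97 + (ord(char) - 97 + shift) % 26)
-- ===== Notes on version B (the rewrite author's own statement) =====
-- stated objective: simpler
-- what changed: The two wrap-around while-loops are replaced by a single closed-form modulo expression chr(97 + (ord(char) - 97 + shift) % 26).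
import Mathlib
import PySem

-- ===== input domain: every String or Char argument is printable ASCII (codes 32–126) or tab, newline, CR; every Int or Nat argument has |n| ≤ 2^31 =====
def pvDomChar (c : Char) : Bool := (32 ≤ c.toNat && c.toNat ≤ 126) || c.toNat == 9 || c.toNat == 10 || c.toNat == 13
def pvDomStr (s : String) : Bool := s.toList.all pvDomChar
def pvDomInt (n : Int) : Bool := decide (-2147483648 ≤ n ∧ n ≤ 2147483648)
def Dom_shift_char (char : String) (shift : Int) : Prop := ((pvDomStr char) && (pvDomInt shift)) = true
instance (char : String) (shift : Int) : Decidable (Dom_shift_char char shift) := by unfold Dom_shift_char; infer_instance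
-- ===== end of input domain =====

-- B replaces A's two wrap-around while-loops with one closed-form modulo; objective: simpler.

-- ===== PORT A =====
-- `while val > 122: val -= 26`
def shiftCharWhileSub (val : Int) : Int :=
  if val > 122 then shiftCharWhileSub (val - 26) else val
termination_by (val - 122).toNat
decreasing_by omega

-- `while val < 97: val += 26`
def shiftCharWhileAdd (val : Int) : Int :=
  if val < 97 then shiftCharWhileAdd (val + 26) else val
termination_by (97 - val).toNat
decreasing_by omega

def shift_char (char : String) (shift : Int) : String :=
  if PySem.Str.strIsalpha char then            -- assert char.isalpha()  (AssertionError excluded by Pre_)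
    if PySem.Str.len char ≠ 1 then ""          -- raise TypeError        (excluded by Pre_)
    else
      match (PySem.Str.lower char).toList with -- char = char.lower(); val = ord(char)
      | [c] => String.mk [Char.ofNat (shiftCharWhileAdd (shiftCharWhileSub ((c.toNat : Int) + shift))).toNat]
      | _ => ""
  else ""

-- ===== PORT B =====
def shift_char_alt (char : String) (shift : Int) : String :=
  if PySem.Str.strIsalpha char then
    if PySem.Str.len char ≠ 1 then ""
    else
      match (PySem.Str.lower char).toList with
      | [] => ""
      | c :: _ => String.mk [Char.ofNat (97 + PySem.Int.mod ((c.toNat : Int) - 97 + shift) 26).toNat]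
  else ""

-- ===== PRECONDITION & SPEC =====
-- Pre_ excludes exactly the inputs on which the Python raises: non-letter strings
-- (AssertionError) and letter strings of length ≠ 1 (TypeError).
def Pre_shift_char (char : String) (shift : Int) : Prop :=
  PySem.Str.strIsalpha char = true ∧ PySem.Str.len char = 1
instance (char : String) (shift : Int) : Decidable (Pre_shift_char char shift) := by
  unfold Pre_shift_char; infer_instance
def pvWitness_shift_char : String × Int := ("q", 5)

def Spec_shift_char (char : String) (shift : Int) (out : String) : Prop := out = shift_char_alt char shift
instance (char : String) (shift : Int) (out : String) : Decidable (Spec_shift_char char shift out) := by unfold Spec_shift_char; infer_instance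

-- ===== CLAIM (what is proved, stated in full; the proofs are below) =====
def Claim_equal_shift_char : Prop := ∀ (char : String) (shift : Int), Dom_shift_char char shift → Pre_shift_char char shift → Spec_shift_char char shift (shift_char char shift)

-- ===== LEMMAS AND PROOFS =====

theorem shiftCharWhileSub_eq (val : Int) (h : 97 ≤ val) :
    shiftCharWhileSub val = 97 + (val - 97) % 26 := by
  fun_induction shiftCharWhileSub val with
  | case1 v hv ih =>
      rw [ih (by omega)]
      omega
  | case2 v hv =>
      omega

theorem shiftCharWhileAdd_eq (val : Int) (h : val ≤ 122) :
    shiftCharWhileAdd val = 97 + (val - 97) % 26 := by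
  fun_induction shiftCharWhileAdd val with
  | case1 v hv ih =>
      rw [ih (by omega)]
      omega
  | case2 v hv =>
      omega

theorem shiftChar_loops_eq (val : Int) :
    shiftCharWhileAdd (shiftCharWhileSub val) = 97 + (val - 97) % 26 := by
  by_cases h : 97 ≤ val
  · rw [shiftCharWhileSub_eq val h]
    have h1 : (97 : Int) + (val - 97) % 26 ≤ 122 := by omega
    rw [shiftCharWhileAdd_eq _ h1]
    omega
  · have : shiftCharWhileSub val = val := by
      unfold shiftCharWhileSub
      rw [if_neg (by omega)]
    rw [this, shiftCharWhileAdd_eq val (by omega)]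

theorem shift_char_main (char : String) (shift : Int)
    (hpre : Pre_shift_char char shift) :
    shift_char char shift = shift_char_alt char shift := by
  obtain ⟨halpha, hlen⟩ := hpre
  unfold shift_char shift_char_alt
  rw [halpha, hlen]
  simp only [if_true, ne_eq, not_true_eq_false, if_false]
  have hlen1 : (PySem.Str.lower char).toList.length = 1 := by
    rw [PySem.Str.toList_lower]
    have := PySem.Str.len_eq char
    simp only [PySem.Chars.lower, List.length_map]
    omega
  obtain ⟨c, hc⟩ : ∃ c, (PySem.Str.lower char).toList = [c] := by
    match hl : (PySem.Str.lower char).toList with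
    | [c] => exact ⟨c, rfl⟩
    | [] => rw [hl] at hlen1; simp at hlen1
    | _ :: _ :: _ => rw [hl] at hlen1; simp at hlen1
  rw [hc]
  dsimp only
  rw [shiftChar_loops_eq]
  rw [PySem.Int.mod_eq_emod_of_pos (by omega)]
  have : (c.toNat : Int) + shift - 97 = (c.toNat : Int) - 97 + shift := by ring
  rw [this]

-- ===== VERDICT (by name: the statement is the Claim_ definition above) =====
theorem shift_char_spec : Claim_equal_shift_char :=
  fun char shift _ hpre => shift_char_main char shift hpre
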